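-- pv_equiv track=rewrite | github.com/mahendar4567/MLA0205-ML | find s algorithm.py | find_s
-- ===== SOURCE A (Python) =====
-- def find_s(examples, target_attribute):
--     hypothesis = examples[0][:]
--
--     for example in examples:
--         if example[target_attribute] == "Yes":
--             for i in range(len(hypothesis)):
--
--                 if hypothesis[i] != example[i]:
--                     hypothesis[i] = '?'
--
--     return hypothesis
--
-- examples = [
--     ['sunny', 'warm', 'high', 'Yes'],
--     ['sunny', 'warm', 'low', 'No'],
--     ['sunny', 'cold', 'high', 'Yes'],
--     ['rainy', 'warm', 'high', 'No']
-- ]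
--
-- target_attribute = 3
--
-- hypothesis = find_s(examples, target_attribute)
-- ===== SOURCE B (Python) =====
-- def find_s(examples, target_attribute):
--     seed = examples[0]
--     positives = [ex for ex in examples if ex[target_attribute] == "Yes"]
--     return [seed[i] if all(ex[i] == seed[i] for ex in positives) else '?'
--             for i in range(len(seed))]
-- ===== Notes on version B (the rewrite author's own statement) =====
-- stated objective: simpler
-- what changed: Replaced A's in-place row-by-row mutation of a copied hypothesis with a column-wise comprehension: filter the positive examples once, then for each column keep the seed value iff every positive example agrees with it, else '?'.
import Mathlib
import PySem

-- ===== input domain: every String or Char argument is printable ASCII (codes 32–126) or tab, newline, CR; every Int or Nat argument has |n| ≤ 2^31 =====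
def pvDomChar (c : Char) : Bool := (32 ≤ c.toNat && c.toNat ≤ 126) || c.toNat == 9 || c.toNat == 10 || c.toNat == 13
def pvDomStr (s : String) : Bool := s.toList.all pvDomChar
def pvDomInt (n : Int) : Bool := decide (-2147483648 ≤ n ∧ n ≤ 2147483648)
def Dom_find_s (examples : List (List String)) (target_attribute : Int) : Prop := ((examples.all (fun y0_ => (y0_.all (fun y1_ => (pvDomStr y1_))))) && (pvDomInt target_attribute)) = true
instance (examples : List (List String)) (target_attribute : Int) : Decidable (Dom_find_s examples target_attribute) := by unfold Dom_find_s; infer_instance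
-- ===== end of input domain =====

-- B replaces A's in-place row-by-row mutation of the hypothesis with a column-wise
-- comprehension over the once-filtered positive examples (objective: simpler).

-- ===== PORT A =====
-- inner loop body: if hypothesis[i] != example[i]: hypothesis[i] = '?'
def innerStep (ex_ : List String) (h : List String) (i : Nat) : List String :=
  if h.getD i "" ≠ ex_.getD i "" then h.set i "?" else h

-- the inner 'for i in range(len(hypothesis))' loop of A
def updateHyp (hypothesis ex_ : List String) : List String :=
  (List.range hypothesis.length).foldl (innerStep ex_) hypothesis

def find_s (examples : List (List String)) (target_attribute : Int) : List String :=
  let hypothesis := (PySem.List.pyGet? examples 0).getD []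
  examples.foldl
    (fun hypothesis ex_ =>
      if (PySem.List.pyGet? ex_ target_attribute).getD "" == "Yes" then
        updateHyp hypothesis ex_
      else hypothesis)
    hypothesis

-- ===== PORT B =====
def find_s_alt (examples : List (List String)) (target_attribute : Int) : List String :=
  let seed := (PySem.List.pyGet? examples 0).getD []
  let positives := examples.filter
    (fun ex => (PySem.List.pyGet? ex target_attribute).getD "" == "Yes")
  (List.range seed.length).map
    (fun i => if positives.all (fun ex => ex.getD i "" == seed.getD i "")
              then seed.getD i "" else "?")

-- ===== PRECONDITION & SPEC =====
-- Pre_ excludes exactly the inputs where Python A raises: empty examples (IndexError on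
-- examples[0]), an invalid target_attribute index for some example, and a positive example
-- shorter than examples[0] (IndexError in the inner loop).
def Pre_find_s (examples : List (List String)) (target_attribute : Int) : Prop :=
  examples ≠ [] ∧ ∀ ex ∈ examples,
    (PySem.List.pyGet? ex target_attribute).isSome = true ∧
    ((PySem.List.pyGet? ex target_attribute).getD "" = "Yes" →
      (examples.headD []).length ≤ ex.length)
instance (examples : List (List String)) (target_attribute : Int) : Decidable (Pre_find_s examples target_attribute) := by unfold Pre_find_s; infer_instance

def pvWitness_find_s : List (List String) × Int :=
  ([["sunny", "warm", "Yes"], ["sunny", "cold", "No"]], 2)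

def Spec_find_s (examples : List (List String)) (target_attribute : Int) (out : List String) : Prop := out = find_s_alt examples target_attribute
instance (examples : List (List String)) (target_attribute : Int) (out : List String) : Decidable (Spec_find_s examples target_attribute out) := by unfold Spec_find_s; infer_instance

-- ===== CLAIM (what is proved, stated in full; the proofs are below) =====
def Claim_equal_find_s : Prop := ∀ (examples : List (List String)) (target_attribute : Int), Dom_find_s examples target_attribute → Pre_find_s examples target_attribute → Spec_find_s examples target_attribute (find_s examples target_attribute)

-- ===== LEMMAS AND PROOFS =====

theorem innerStep_length (ex h : List String) (i : Nat) :
    (innerStep ex h i).length = h.length := by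
  unfold innerStep; split <;> simp

theorem foldl_innerStep_length (ex : List String) (l : List Nat) :
    ∀ h : List String, (l.foldl (innerStep ex) h).length = h.length := by
  induction l with
  | nil => intro h; rfl
  | cons a l ih => intro h; simp [List.foldl, ih, innerStep_length]

theorem inner_getElem? (ex hyp : List String) (k : Nat) :
    k ≤ hyp.length → ∀ j : Nat,
    ((List.range k).foldl (innerStep ex) hyp)[j]? =
      if j < k then
        (if hyp.getD j "" ≠ ex.getD j "" then some "?" else hyp[j]?)
      else hyp[j]? := by
  induction k with
  | zero => intro _ j; simp
  | succ k ih =>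
    intro hk j
    have hk' : k ≤ hyp.length := Nat.le_of_succ_le hk
    have ih := ih hk'
    rw [List.range_succ, List.foldl_append]
    simp only [List.foldl]
    set prev := (List.range k).foldl (innerStep ex) hyp with hprev
    have hlen : prev.length = hyp.length := foldl_innerStep_length ex _ hyp
    have hpk : prev[k]? = hyp[k]? := by
      have := ih k; simpa using this
    have hpkD : prev.getD k "" = hyp.getD k "" := by
      rw [List.getD_eq_getElem?_getD, List.getD_eq_getElem?_getD, hpk]
    unfold innerStep
    rw [hpkD]
    by_cases hne : hyp.getD k "" ≠ ex.getD k ""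
    · rw [if_pos hne]
      by_cases hjk : j = k
      · subst hjk
        have hklt : j < prev.length := by omega
        rw [List.getElem?_set_self hklt, if_pos (Nat.lt_succ_self j), if_pos hne]
      · rw [List.getElem?_set_ne (by omega), ih j]
        by_cases hjlt : j < k
        · rw [if_pos hjlt, if_pos (by omega : j < k + 1)]
        · rw [if_neg hjlt, if_neg (by omega : ¬ j < k + 1)]
    · rw [if_neg hne, ih j]
      by_cases hjk : j = k
      · subst hjk
        rw [if_neg (Nat.lt_irrefl j), if_pos (Nat.lt_succ_self j), if_neg hne]
      · by_cases hjlt : j < k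
        · rw [if_pos hjlt, if_pos (by omega : j < k + 1)]
        · rw [if_neg hjlt, if_neg (by omega : ¬ j < k + 1)]

theorem updateHyp_map (seedf : Nat → String) (P : Nat → Bool) (n : Nat) (ex : List String) :
    updateHyp ((List.range n).map (fun i => if P i then seedf i else "?")) ex
      = (List.range n).map
          (fun i => if P i && (ex.getD i "" == seedf i) then seedf i else "?") := by
  set hyp := (List.range n).map (fun i => if P i then seedf i else "?") with hhyp
  have hlen : hyp.length = n := by simp [hhyp]
  apply List.ext_getElem?
  intro j
  unfold updateHyp
  rw [hlen]
  rw [inner_getElem? ex hyp n (by omega) j]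
  by_cases hj : j < n
  · have hget : hyp[j]? = some (if P j then seedf j else "?") := by
      simp [hhyp, hj]
    have hgetD : hyp.getD j "" = (if P j then seedf j else "?") := by
      rw [List.getD_eq_getElem?_getD, hget]; rfl
    have hr : ((List.range n).map
        (fun i => if P i && (ex.getD i "" == seedf i) then seedf i else "?"))[j]?
        = some (if P j && (ex.getD j "" == seedf j) then seedf j else "?") := by
      simp [hj]
    rw [if_pos hj, hgetD, hget, hr]
    cases hP : P j <;> cases heq : (ex.getD j "" == seedf j) <;>
      simp_all [beq_iff_eq] <;>
      first
        | rfl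
        | (exact fun h => absurd h.symm heq)
  · have hno : ¬ j < n := hj
    rw [if_neg hno]
    simp [hhyp, hno]

theorem outer_foldl (target_attribute : Int) (seedf : Nat → String) (n : Nat) :
    ∀ (L : List (List String)) (P : Nat → Bool),
      L.foldl
        (fun hypothesis ex_ =>
          if (PySem.List.pyGet? ex_ target_attribute).getD "" == "Yes" then
            updateHyp hypothesis ex_
          else hypothesis)
        ((List.range n).map (fun i => if P i then seedf i else "?"))
      = (List.range n).map
          (fun i =>
            if P i && (L.filter
                (fun ex => (PySem.List.pyGet? ex target_attribute).getD "" == "Yes")).all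
                (fun ex => ex.getD i "" == seedf i)
            then seedf i else "?") := by
  intro L
  induction L with
  | nil => intro P; simp
  | cons ex L ih =>
    intro P
    simp only [List.foldl]
    by_cases hpos : ((PySem.List.pyGet? ex target_attribute).getD "" == "Yes") = true
    · rw [if_pos hpos, updateHyp_map seedf P n ex,
        ih (fun i => P i && (ex.getD i "" == seedf i))]
      have hf : (ex :: L).filter
          (fun ex => (PySem.List.pyGet? ex target_attribute).getD "" == "Yes")
          = ex :: L.filter (fun ex => (PySem.List.pyGet? ex target_attribute).getD "" == "Yes") := by
        simp [List.filter, hpos]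
      rw [hf]
      apply List.map_congr_left
      intro i _
      simp [List.all, Bool.and_assoc]
    · rw [if_neg hpos, ih P]
      have hf : (ex :: L).filter
          (fun ex => (PySem.List.pyGet? ex target_attribute).getD "" == "Yes")
          = L.filter (fun ex => (PySem.List.pyGet? ex target_attribute).getD "" == "Yes") := by
        have hposf : ((PySem.List.pyGet? ex target_attribute).getD "" == "Yes") = false := by
          simpa using hpos
        simp [List.filter, hposf]
      rw [hf]

theorem self_eq_range_map (l : List String) :
    l = (List.range l.length).map (fun i => l.getD i "") := by
  apply List.ext_getElem?
  intro j
  by_cases hj : j < l.length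
  · simp [hj, List.getD_eq_getElem?_getD]
  · simp [hj]

-- ===== VERDICT (by name: the statement is the Claim_ definition above) =====
theorem find_s_spec : Claim_equal_find_s := by
  intro examples target_attribute _hDom _hPre
  unfold Spec_find_s find_s find_s_alt
  set seed := (PySem.List.pyGet? examples 0).getD [] with hseed
  have hout := outer_foldl target_attribute (fun i => seed.getD i "") seed.length examples
    (fun _ => true)
  have hinit : (List.range seed.length).map
      (fun i => if (fun _ : Nat => true) i then seed.getD i "" else "?") = seed := by
    simpa using (self_eq_range_map seed).symm
  rw [hinit] at hout
  rw [hout]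
  simp
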